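-- pv_equiv track=rewrite | github.com/Min-ji99/BES2-AlgorithmStudy | PG/Brute_Force/PG_12987.py | solution
-- ===== SOURCE A (Python) =====
-- def solution(A, B):
--     answer = 0
--     A.sort()
--     B.sort()
--     idx=len(B)-1
--     for i in range(len(A)-1, -1, -1):
--         if A[i] < B[idx]:
--             answer+=1
--             idx-=1
--     return answer
-- ===== SOURCE B (Python) =====
-- def solution(A, B):
--     # Hall-deficiency sweep: the maximum number of wins equals
--     # len(B) - max(0, max over y in B of (#{b in B : b <= y} - #{a in A : a < y})).
--     # One merge-style pass over sorted B computes that worst surplus; no matching is built.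
--     A.sort()
--     B.sort()
--     i = 0       # = #{a in A : a < current y}
--     j = 0       # = #{b in B processed so far}
--     worst = 0
--     for y in B:
--         while i < len(A) and A[i] < y:
--             i += 1
--         j += 1
--         worst = max(worst, j - i)
--     return len(B) - worst
-- ===== Notes on version B (the rewrite author's own statement) =====
-- stated objective: alternative
-- what changed: B never constructs a matching: instead of A's greedy pairing loop it runs a Hall-deficiency counting sweep over sorted B, computing for each value y the surplus of B-elements <= y over A-elements < y, and returns len(B) minus the worst surplus, which equals the maximum number of wins.
-- intended difference: On inputs with len(A) > len(B) whose sorted lists satisfy sorted(A)[j+1] < sorted(B)[j] for every j (B is exhausted before the loop over A ends, but not so early that the index underflows past -len(B)), A's index goes negative and Python's negative-index wraparound re-reads B from the top, so A returns an inflated count (e.g. solution([0,0],[1]) == 2); B returns the true number of winnable pairings (1 there), which is the intended value. — e.g. on solution([0, 0], [1]): A returns 2, B returns 1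
import Mathlib
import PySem

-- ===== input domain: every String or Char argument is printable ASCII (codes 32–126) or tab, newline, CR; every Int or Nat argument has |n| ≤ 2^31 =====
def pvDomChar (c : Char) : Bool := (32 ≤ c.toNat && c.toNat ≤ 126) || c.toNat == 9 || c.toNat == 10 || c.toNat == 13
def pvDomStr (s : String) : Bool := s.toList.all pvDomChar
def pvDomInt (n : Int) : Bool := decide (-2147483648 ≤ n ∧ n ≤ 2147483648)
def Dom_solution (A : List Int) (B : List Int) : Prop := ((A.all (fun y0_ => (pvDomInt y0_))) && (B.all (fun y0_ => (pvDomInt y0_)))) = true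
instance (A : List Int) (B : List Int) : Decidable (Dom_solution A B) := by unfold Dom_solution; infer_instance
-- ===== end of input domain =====

-- B replaces A's greedy pairing loop by a Hall-deficiency counting sweep: one merge-style pass
-- over sorted B computes the worst surplus of B-elements <= y over A-elements < y, and returns
-- len(B) minus that surplus; no matching is constructed.  Both versions sort A and B in place
-- (same mutation); return values are proved equal outside D_ below.


-- ===== PORT A =====
-- one loop step of A: state (answer, idx), read a[i] and b[idx] (none = IndexError)
def solStep (a b : List Int) (st : Option (Int × Int)) (i : Int) : Option (Int × Int) :=
  match st with
  | none => none
  | some (ans, idx) =>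
    match PySem.List.pyGet? a i, PySem.List.pyGet? b idx with
    | some ai, some bi => if ai < bi then some (ans + 1, idx - 1) else some (ans, idx)
    | _, _ => none

def solution (A : List Int) (B : List Int) : Int :=
  let a := PySem.List.sorted A (fun x => x) false
  let b := PySem.List.sorted B (fun x => x) false
  match (PySem.List.pyRange (PySem.List.len a - 1) (-1) (-1)).foldl (solStep a b)
      (some (0, PySem.List.len b - 1)) with
  | some (ans, _) => ans
  | none => 0

-- ===== PORT B =====
-- the inner `while i < len(A) and A[i] < y: i += 1` of Source B; the fuel a.length - i bounds the
-- number of iterations exactly (the condition requires i < len(A)), so this is the same loop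
def altAdvanceFuel : Nat → List Int → Int → Nat → Nat
  | 0, _, _, i => i
  | fuel + 1, a, y, i => if i < a.length ∧ a.getD i 0 < y then altAdvanceFuel fuel a y (i + 1) else i

def altAdvance (a : List Int) (y : Int) (i : Nat) : Nat := altAdvanceFuel (a.length - i) a y i

-- one step of Source B's for-loop: state (i, j, worst)
def altStep (a : List Int) (st : Nat × Nat × Int) (y : Int) : Nat × Nat × Int :=
  let i := altAdvance a y st.1
  (i, st.2.1 + 1, max st.2.2 (((st.2.1 + 1 : Nat) : Int) - (i : Int)))

def solution_alt (A : List Int) (B : List Int) : Int :=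
  let a := PySem.List.sorted A (fun x => x) false
  let b := PySem.List.sorted B (fun x => x) false
  PySem.List.len b - (b.foldl (altStep a) (0, 0, 0)).2.2

-- ===== PRECONDITION & SPEC =====
-- Pre_ excludes exactly the inputs where A raises IndexError: B empty with A nonempty, or the
-- decrementing index wrapping past -len(B) (both verified against the Python); A returns nowhere
-- here.  Both conditions are stated order-free, by counting: for sorted lists, sorted(A)[k] < y
-- iff A holds at least k+1 elements below y, so each 'sorted(A)[f(j)] < sorted(B)[j]' clause
-- becomes a pure counting inequality over the raw inputs.
def Pre_solution (A : List Int) (B : List Int) : Prop :=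
  ¬ ((A ≠ [] ∧ B = []) ∨
     (1 ≤ B.length ∧ 2 * B.length + 1 ≤ A.length ∧
      ∀ y ∈ B, B.length + B.countP (fun z => z ≤ y) + 1 ≤ A.countP (fun z => z < y)))
instance (A : List Int) (B : List Int) : Decidable (Pre_solution A B) := by unfold Pre_solution; infer_instance
def pvWitness_solution : List Int × List Int := ([1], [2])

-- On inputs with len(A) > len(B) whose sorted lists satisfy sorted(A)[j+1] < sorted(B)[j] for every j
-- (equivalently, by counting: every y in B has at least #(B-elements <= y) + 1 A-elements below it;
-- B is exhausted before the loop over A ends, but not so early that the index underflows past -len(B)),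
-- A's index goes negative and Python's wraparound re-reads B from the top, so A returns an inflated
-- count (solution([0,0],[1]) == 2); B returns the true number of winnable pairings (1), as intended.
def D_solution (A : List Int) (B : List Int) : Prop :=
  B.length < A.length ∧ 1 ≤ B.length ∧
  ∀ y ∈ B, B.countP (fun z => z ≤ y) + 1 ≤ A.countP (fun z => z < y)
instance (A : List Int) (B : List Int) : Decidable (D_solution A B) := by unfold D_solution; infer_instance

def Spec_solution (A : List Int) (B : List Int) (out : Int) : Prop := ¬ D_solution A B → out = solution_alt A B
instance (A : List Int) (B : List Int) (out : Int) : Decidable (Spec_solution A B out) := by unfold Spec_solution; infer_instance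

def pvDiffWitness_solution : List Int × List Int := ([0, 0], [1])
def pvDiffWitnessOut_solution : Int × Int := (2, 1)

-- ===== CLAIM (what is proved, stated in full; the proofs are below) =====
def Claim_unchanged_solution : Prop := ∀ (A : List Int) (B : List Int), Dom_solution A B → Pre_solution A B → Spec_solution A B (solution A B)
def Claim_changed_solution : Prop := Dom_solution (pvDiffWitness_solution.1) (pvDiffWitness_solution.2) ∧ Pre_solution (pvDiffWitness_solution.1) (pvDiffWitness_solution.2) ∧ D_solution (pvDiffWitness_solution.1) (pvDiffWitness_solution.2) ∧ solution (pvDiffWitness_solution.1) (pvDiffWitness_solution.2) = pvDiffWitnessOut_solution.1 ∧ solution_alt (pvDiffWitness_solution.1) (pvDiffWitness_solution.2) = pvDiffWitnessOut_solution.2 ∧ pvDiffWitnessOut_solution.1 ≠ pvDiffWitnessOut_solution.2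

def Claim_exact_solution : Prop := ∀ (A : List Int) (B : List Int), Dom_solution A B → Pre_solution A B → D_solution A B → solution A B ≠ solution_alt A B

-- ===== LEMMAS AND PROOFS =====

-- forward greedy matching on ascending lists (reference notion tying the two ports together)
def fwd : List Int → List Int → Int
  | [], _ => 0
  | _, [] => 0
  | x :: a, y :: b => if x < y then 1 + fwd a b else fwd (x :: a) b
termination_by a b => a.length + b.length

-- backward greedy of A's loop, on descending lists, truncated when b runs out
def bwd : List Int → List Int → Int
  | [], _ => 0
  | _ :: _, [] => 0
  | x :: a, y :: b => if x < y then 1 + bwd a b else bwd a (y :: b)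

-- "the loop never underflows": b does not run out while a-elements remain (descending lists)
def okRun : List Int → List Int → Bool
  | [], _ => true
  | _ :: _, [] => false
  | x :: a, y :: b => if x < y then okRun a b else okRun a (y :: b)

-- the Hall deficiency, in the same recursion shape as fwd
def dm : List Int → List Int → Int
  | _, [] => 0
  | [], _ :: b => 1 + dm [] b
  | x :: a, y :: b => if x < y then dm a b else 1 + dm (x :: a) b
termination_by a b => a.length + b.length

-- the surplus sweep in closed form: state (index j, running worst)
def W (a : List Int) : Nat → Int → List Int → Int
  | _, w, [] => w
  | j, w, y :: b => W a (j + 1) (max w (((j + 1 : Nat) : Int) - (a.countP (fun z => z < y) : Int))) b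

theorem fwd_nil_right (a : List Int) : fwd a [] = 0 := by cases a <;> simp [fwd]

theorem fwd_drop_max (b u : List Int) (x : Int) (h : ∀ z ∈ b, z ≤ x) :
    fwd (u ++ [x]) b = fwd u b := by
  induction b generalizing u with
  | nil => simp [fwd_nil_right]
  | cons y b' ih =>
    have hyx : y ≤ x := h y (by simp)
    cases u with
    | nil =>
      simp only [List.nil_append]
      have : fwd [x] (y :: b') = fwd [x] b' := by simp [fwd, not_lt.mpr hyx]
      rw [this]
      have := ih (u := []) (fun z hz => h z (by simp [hz]))
      simpa [fwd] using this
    | cons x0 u' =>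
      by_cases hlt : x0 < y
      · simp only [List.cons_append, fwd, if_pos hlt]
        rw [ih (u := u') (fun z hz => h z (by simp [hz]))]
      · simp only [List.cons_append, fwd, if_neg hlt]
        exact ih (u := x0 :: u') (fun z hz => h z (by simp [hz]))

theorem fwd_pair_max (u : List Int) (x : Int) (v : List Int) (y : Int)
    (hxy : x < y) (hu : u.Pairwise (· ≤ ·)) (hux : ∀ z ∈ u, z ≤ x) :
    fwd (u ++ [x]) (v ++ [y]) = 1 + fwd u v := by
  induction hn : u.length + v.length using Nat.strong_induction_on generalizing u v with
  | _ n ih =>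
  cases u with
  | nil =>
    cases v with
    | nil => simp [fwd, hxy]
    | cons y0 v' =>
      by_cases h0 : x < y0
      · simp [fwd, h0]
      · simp only [List.nil_append, List.cons_append, fwd, if_neg h0]
        have := ih (0 + v'.length) (by simp at hn; omega) [] v' (by simp) (by simp) (by simp)
        simpa [fwd] using this
  | cons x0 u' =>
    cases v with
    | nil =>
      have hx0 : x0 ≤ x := hux x0 (by simp)
      have hlt : x0 < y := lt_of_le_of_lt hx0 hxy
      simp only [List.cons_append, List.nil_append, fwd, if_pos hlt]
      simp [fwd_nil_right]
    | cons y0 v' =>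
      by_cases hlt : x0 < y0
      · simp only [List.cons_append, fwd, if_pos hlt]
        have := ih (u'.length + v'.length) (by simp at hn; omega) u' v'
          (List.pairwise_cons.mp hu).2 (fun z hz => hux z (by simp [hz])) rfl
        rw [this]
      · simp only [List.cons_append, fwd, if_neg hlt]
        have := ih ((x0 :: u').length + v'.length) (by simp at hn; simp; omega)
          (x0 :: u') v' hu hux rfl
        simpa using this

-- L4: on descending lists, the truncated backward greedy equals the forward greedy of the reversals
theorem fwd_eq_bwd (ra : List Int) : ∀ rb : List Int, ra.Pairwise (· ≥ ·) → rb.Pairwise (· ≥ ·) →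
    fwd ra.reverse rb.reverse = bwd ra rb := by
  induction ra with
  | nil => intro rb _ _; simp [fwd, bwd]
  | cons x ra' ih =>
    intro rb hra hrb
    cases rb with
    | nil => simp [fwd_nil_right, bwd]
    | cons y rb' =>
      simp only [List.reverse_cons]
      by_cases hxy : x < y
      · rw [fwd_pair_max ra'.reverse x rb'.reverse y hxy
          (by rw [List.pairwise_reverse]; exact (List.pairwise_cons.mp hra).2)
          (fun z hz => (List.pairwise_cons.mp hra).1 z (List.mem_reverse.mp hz))]
        rw [ih rb' (List.pairwise_cons.mp hra).2 (List.pairwise_cons.mp hrb).2]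
        simp [bwd, hxy]
      · rw [fwd_drop_max (rb'.reverse ++ [y]) ra'.reverse x (by
          intro z hz
          have hy : y ≤ x := not_lt.mp hxy
          rcases List.mem_append.mp hz with h | h
          · exact le_trans ((List.pairwise_cons.mp hrb).1 z (List.mem_reverse.mp h)) hy
          · simp at h; exact h ▸ hy)]
        rw [← List.reverse_cons, ih (y :: rb') (List.pairwise_cons.mp hra).2 hrb]
        simp [bwd, hxy]

-- L2: if the run underflows, a leftover exists and every b element beats the matching a slice
theorem okRun_false (ra : List Int) : ∀ rb : List Int, ra.Pairwise (· ≥ ·) →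
    okRun ra rb = false →
    rb.length < ra.length ∧
      ∀ j : Nat, j < rb.length → ra.getD (ra.length - rb.length - 1 + j) 0 < rb.getD j 0 := by
  induction ra with
  | nil => intro rb _ h; simp [okRun] at h
  | cons x ra' ih =>
    intro rb hra h
    cases rb with
    | nil =>
      refine ⟨by simp, ?_⟩
      intro j hj
      simp at hj
    | cons y rb' =>
      by_cases hxy : x < y
      · have h' : okRun ra' rb' = false := by simpa [okRun, hxy] using h
        obtain ⟨hlen, hall⟩ := ih rb' (List.pairwise_cons.mp hra).2 h'
        refine ⟨by simp; omega, ?_⟩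
        intro j hj
        simp only [List.length_cons] at hj ⊢
        rcases Nat.eq_zero_or_pos j with rfl | hjpos
        · rcases Nat.eq_zero_or_pos (ra'.length - rb'.length - 1) with hz | hz
          · have hidx : ra'.length + 1 - (rb'.length + 1) - 1 + 0 = 0 := by omega
            rw [hidx]
            simpa using hxy
          · have hidx : ra'.length + 1 - (rb'.length + 1) - 1 + 0 =
                (ra'.length - rb'.length - 1 - 1) + 1 := by omega
            rw [hidx]
            simp only [List.getD_cons_succ, List.getD_cons_zero]
            have hin : ra'.length - rb'.length - 1 - 1 < ra'.length := by omega
            have hmem : ra'.getD (ra'.length - rb'.length - 1 - 1) 0 ∈ ra' := by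
              rw [List.getD_eq_getElem _ _ hin]
              exact List.getElem_mem hin
            have hle : ra'.getD (ra'.length - rb'.length - 1 - 1) 0 ≤ x :=
              (List.pairwise_cons.mp hra).1 _ hmem
            exact lt_of_le_of_lt hle hxy
        · obtain ⟨j', rfl⟩ : ∃ j', j = j' + 1 := ⟨j - 1, by omega⟩
          have hidx : ra'.length + 1 - (rb'.length + 1) - 1 + (j' + 1) =
              (ra'.length - rb'.length - 1 + j') + 1 := by omega
          rw [hidx]
          simp only [List.getD_cons_succ]
          exact hall j' (by omega)
      · have h' : okRun ra' (y :: rb') = false := by simpa [okRun, hxy] using h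
        obtain ⟨hlen, hall⟩ := ih (y :: rb') (List.pairwise_cons.mp hra).2 h'
        simp only [List.length_cons] at hlen hall ⊢
        refine ⟨by omega, ?_⟩
        intro j hj
        have hidx : ra'.length + 1 - (rb'.length + 1) - 1 + j =
            (ra'.length - (rb'.length + 1) - 1 + j) + 1 := by omega
        rw [hidx]
        simp only [List.getD_cons_succ]
        exact hall j hj

-- L1: the index loop of port A computes the truncated backward greedy while the run is ok
theorem bridge (a b : List Int) : ∀ (k s : Nat) (ans : Int), k ≤ a.length → s ≤ b.length →
    okRun ((a.take k).reverse) ((b.take s).reverse) = true →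
    ∃ idx', (PySem.List.pyRange ((k : Int) - 1) (-1) (-1)).foldl (solStep a b) (some (ans, (s : Int) - 1)) =
      some (ans + bwd ((a.take k).reverse) ((b.take s).reverse), idx') := by
  intro k
  induction k with
  | zero =>
    intro s ans _ _ _
    rw [PySem.List.pyRange_neg_one_eq_nil (by omega)]
    exact ⟨(s : Int) - 1, by simp [bwd]⟩
  | succ k ihk =>
    intro s ans hk hs hok
    have hk' : k < a.length := by omega
    have hra : (a.take (k + 1)).reverse = a[k] :: (a.take k).reverse := by
      rw [List.take_succ_eq_append_getElem hk']; simp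
    have hcons : PySem.List.pyRange (((k + 1 : Nat) : Int) - 1) (-1) (-1) =
        (((k + 1 : Nat) : Int) - 1) :: PySem.List.pyRange (((k + 1 : Nat) : Int) - 1 - 1) (-1) (-1) :=
      PySem.List.pyRange_neg_one_cons (by push_cast; omega)
    have hidx1 : ((k + 1 : Nat) : Int) - 1 = ((k : Nat) : Int) := by push_cast; ring
    have hidx2 : ((k + 1 : Nat) : Int) - 1 - 1 = ((k : Nat) : Int) - 1 := by push_cast; ring
    have hga : PySem.List.pyGet? a ((k : Nat) : Int) = some a[k] := by
      rw [PySem.List.pyGet?_natCast]; simp [hk']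
    cases s with
    | zero => rw [hra] at hok; simp [okRun] at hok
    | succ s' =>
      have hs' : s' < b.length := by omega
      have hrb : (b.take (s' + 1)).reverse = b[s'] :: (b.take s').reverse := by
        rw [List.take_succ_eq_append_getElem hs']; simp
      have hgb : PySem.List.pyGet? b (((s' + 1 : Nat) : Int) - 1) = some b[s'] := by
        have h1 : ((s' + 1 : Nat) : Int) - 1 = ((s' : Nat) : Int) := by push_cast; ring
        rw [h1, PySem.List.pyGet?_natCast]; simp [hs']
      rw [hcons, List.foldl_cons, hidx1]
      rw [hra, hrb] at hok ⊢
      by_cases hcmp : a[k] < b[s']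
      · have hok' : okRun ((a.take k).reverse) ((b.take s').reverse) = true := by
          simpa [okRun, hcmp] using hok
        have hstep : solStep a b (some (ans, ((s' + 1 : Nat) : Int) - 1)) ((k : Nat) : Int) =
            some (ans + 1, ((s' : Nat) : Int) - 1) := by
          simp only [solStep, hga, hgb, if_pos hcmp]
          have h2 : ((s' + 1 : Nat) : Int) - 1 - 1 = ((s' : Nat) : Int) - 1 := by push_cast; ring
          rw [h2]
        obtain ⟨idx', hrec⟩ := ihk s' (ans + 1) (by omega) (by omega) hok'
        refine ⟨idx', ?_⟩
        rw [hstep, hrec]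
        have h3 : ans + 1 + bwd ((a.take k).reverse) ((b.take s').reverse) =
            ans + bwd (a[k] :: (a.take k).reverse) (b[s'] :: (b.take s').reverse) := by
          simp only [bwd, if_pos hcmp]; ring
        rw [h3]
      · have hok' : okRun ((a.take k).reverse) ((b.take (s' + 1)).reverse) = true := by
          rw [hrb]; simpa [okRun, hcmp] using hok
        have hstep : solStep a b (some (ans, ((s' + 1 : Nat) : Int) - 1)) ((k : Nat) : Int) =
            some (ans, ((s' + 1 : Nat) : Int) - 1) := by
          simp only [solStep, hga, hgb, if_neg hcmp]
        obtain ⟨idx', hrec⟩ := ihk (s' + 1) ans (by omega) (by omega) hok'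
        refine ⟨idx', ?_⟩
        rw [hstep, hrec, hrb]
        have h3 : bwd ((a.take k).reverse) (b[s'] :: (b.take s').reverse) =
            bwd (a[k] :: (a.take k).reverse) (b[s'] :: (b.take s').reverse) := by
          simp only [bwd, if_neg hcmp]
        rw [h3]

-- B-side chain, part 1: greedy count + deficiency = |b|  (pure bookkeeping, no sortedness)
theorem fwd_add_dm (b : List Int) : ∀ a : List Int, fwd a b + dm a b = (b.length : Int) := by
  induction b with
  | nil => intro a; simp [fwd_nil_right, dm]
  | cons y b' ih =>
    intro a
    cases a with
    | nil =>
      have := ih []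
      simp only [fwd] at this
      simp only [fwd, dm, List.length_cons]
      push_cast
      omega
    | cons x a' =>
      by_cases hxy : x < y
      · have := ih a'
        simp only [fwd, dm, if_pos hxy, List.length_cons]
        push_cast
        omega
      · have := ih (x :: a')
        simp only [fwd, dm, if_neg hxy, List.length_cons]
        push_cast
        omega

-- shifting the worst-so-far by one
theorem W_add_one (a : List Int) (b : List Int) : ∀ (j : Nat) (w : Int),
    W a (j + 1) (w + 1) b = 1 + W a j w b := by
  induction b with
  | nil => intro j w; simp [W]; ring
  | cons y b' ih =>
    intro j w
    simp only [W]
    have h : max (w + 1) (((j + 1 + 1 : Nat) : Int) - (a.countP (fun z => z < y) : Int)) =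
        max w (((j + 1 : Nat) : Int) - (a.countP (fun z => z < y) : Int)) + 1 := by
      push_cast
      rcases le_total w (((j : Int) + 1) - (a.countP (fun z => z < y) : Int)) with h | h
      · rw [max_eq_right (by omega), max_eq_right h]; ring
      · rw [max_eq_left (by omega), max_eq_left h]
    rw [h, ih]

-- dropping a head of a that is below every element of b shifts j by one
theorem W_cons_lt (a : List Int) (x : Int) (b : List Int) : ∀ (j : Nat) (w : Int), 1 ≤ j →
    (∀ z ∈ b, x < z) → W (x :: a) j w b = W a (j - 1) w b := by
  induction b with
  | nil => intro j w _ _; simp [W]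
  | cons y b' ih =>
    intro j w hj hall
    have hx : x < y := hall y (by simp)
    simp only [W]
    have hc : ((x :: a).countP (fun z => z < y) : Int) = (a.countP (fun z => z < y) : Int) + 1 := by
      simp [hx]
    have hterm : ((j + 1 : Nat) : Int) - ((x :: a).countP (fun z => z < y) : Int) =
        ((j - 1 + 1 : Nat) : Int) - (a.countP (fun z => z < y) : Int) := by
      rw [hc]; push_cast [hj]; omega
    rw [hterm, ih (j + 1) _ (by omega) (fun z hz => hall z (by simp [hz]))]
    have : j + 1 - 1 = j - 1 + 1 := by omega
    rw [this]

-- the sweep computes the deficiency on sorted lists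
theorem W_eq_dm (b : List Int) : ∀ a : List Int, a.Pairwise (· ≤ ·) → b.Pairwise (· ≤ ·) →
    W a 0 0 b = dm a b := by
  induction b with
  | nil => intro a _ _; simp [W, dm]
  | cons y b' ih =>
    intro a ha hb
    cases a with
    | nil =>
      simp only [W, dm, List.countP_nil]
      have h1 : max (0 : Int) (((0 + 1 : Nat) : Int) - ((0 : Nat) : Int)) = 0 + 1 := by
        push_cast; omega
      rw [h1, W_add_one, ih [] (by simp) (List.pairwise_cons.mp hb).2]
    | cons x a' =>
      by_cases hxy : x < y
      · have hc1 : 1 ≤ (x :: a').countP (fun z => z < y) := by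
          have : x ∈ x :: a' := by simp
          calc 1 = [x].countP (fun z => z < y) := by simp [hxy]
          _ ≤ (x :: a').countP (fun z => z < y) := by
                simp [hxy]
        have h1 : max (0 : Int) (((0 + 1 : Nat) : Int) - ((x :: a').countP (fun z => z < y) : Int)) = 0 := by
          have : (1 : Int) ≤ ((x :: a').countP (fun z => z < y) : Int) := by exact_mod_cast hc1
          rw [max_eq_left (by omega)]
        simp only [W]
        rw [h1]
        have hall : ∀ z ∈ b', x < z := by
          intro z hz
          exact lt_of_lt_of_le hxy ((List.pairwise_cons.mp hb).1 z hz)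
        rw [W_cons_lt a' x b' 1 0 le_rfl hall]
        simp only [Nat.sub_self]
        rw [ih a' (List.pairwise_cons.mp ha).2 (List.pairwise_cons.mp hb).2]
        simp [dm, hxy]
      · have hc0 : (x :: a').countP (fun z => z < y) = 0 := by
          rw [List.countP_eq_zero]
          intro z hz
          simp only [decide_eq_true_eq]
          rcases List.mem_cons.mp hz with rfl | hz'
          · exact hxy
          · intro hlt
            exact hxy (lt_of_le_of_lt ((List.pairwise_cons.mp ha).1 z hz') hlt)
        simp only [W]
        rw [hc0]
        have h1 : max (0 : Int) (((0 + 1 : Nat) : Int) - ((0 : Nat) : Int)) = 0 + 1 := by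
          push_cast; omega
        rw [h1, W_add_one, ih (x :: a') ha (List.pairwise_cons.mp hb).2]
        simp [dm, hxy]

-- the while loop lands exactly on the count of a-elements below y (sorted a)
theorem altAdvanceFuel_eq_countP (a : List Int) (ha : a.Pairwise (· ≤ ·)) (y : Int) :
    ∀ (fuel i : Nat), a.length - i ≤ fuel → i ≤ a.countP (fun z => z < y) →
    altAdvanceFuel fuel a y i = a.countP (fun z => z < y) := by
  intro fuel
  induction fuel with
  | zero =>
    intro i hf hi
    have hcl := List.countP_le_length (l := a) (p := fun z => decide (z < y))
    simp only [altAdvanceFuel]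
    omega
  | succ fuel ih =>
    intro i hf hi
    by_cases hcond : i < a.length ∧ a.getD i 0 < y
    · rw [altAdvanceFuel, if_pos hcond]
      obtain ⟨hlen, hlt⟩ := hcond
      have hge : i + 1 ≤ a.countP (fun z => z < y) := by
        have htake : (a.take (i + 1)).countP (fun z => z < y) = i + 1 := by
          rw [List.countP_eq_length.mpr, List.length_take_of_le (by omega)]
          intro z hz
          simp only [decide_eq_true_eq]
          obtain ⟨k, hk, hzk⟩ := List.mem_take_iff_getElem.mp hz
          have hk' : k ≤ i := by omega
          have : a[k] ≤ a[i] := by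
            rcases Nat.lt_or_ge k i with h | h
            · exact List.pairwise_iff_getElem.mp ha k i (by omega) hlen h
            · have : k = i := by omega
              subst this; exact le_rfl
          rw [← hzk]
          calc a[k] ≤ a[i] := this
          _ = a.getD i 0 := (List.getD_eq_getElem a 0 hlen).symm
          _ < y := hlt
        calc i + 1 = (a.take (i + 1)).countP (fun z => z < y) := htake.symm
        _ ≤ a.countP (fun z => z < y) := by
              conv_rhs => rw [← List.take_append_drop (i + 1) a]
              rw [List.countP_append]; omega
      exact ih (i + 1) (by omega) hge
    · rw [altAdvanceFuel, if_neg hcond]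
      by_cases hlen : i < a.length
      · have hlt : ¬ a.getD i 0 < y := fun h => hcond ⟨hlen, h⟩
        have hle : a.countP (fun z => z < y) ≤ i := by
          have hdrop : (a.drop i).countP (fun z => z < y) = 0 := by
            rw [List.countP_eq_zero]
            intro z hz
            simp only [decide_eq_true_eq]
            obtain ⟨k, hk, hzk⟩ := List.mem_drop_iff_getElem.mp hz
            have : a[i] ≤ a[i + k] := by
              rcases Nat.eq_zero_or_pos k with rfl | hkpos
              · simp
              · exact List.pairwise_iff_getElem.mp ha i (i + k) hlen (by omega) (by omega)
            intro hlty
            apply hlt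
            rw [List.getD_eq_getElem a 0 hlen]
            calc a[i] ≤ a[i + k] := this
            _ = z := hzk
            _ < y := hlty
          conv_lhs => rw [← List.take_append_drop i a]
          rw [List.countP_append, hdrop]
          have := List.countP_le_length (l := a.take i) (p := fun z => decide (z < y))
          have hlt' : (a.take i).length = i := List.length_take_of_le (by omega)
          omega
        omega
      · have hcl := List.countP_le_length (l := a) (p := fun z => decide (z < y))
        omega

theorem altAdvance_eq_countP (a : List Int) (ha : a.Pairwise (· ≤ ·)) (y : Int)
    (i : Nat) (hi : i ≤ a.countP (fun z => z < y)) :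
    altAdvance a y i = a.countP (fun z => z < y) :=
  altAdvanceFuel_eq_countP a ha y (a.length - i) i le_rfl hi

-- port B's fold computes the sweep W (sorted a and b; i dominated by every remaining count)
theorem alt_fold_eq_W (a : List Int) (ha : a.Pairwise (· ≤ ·)) :
    ∀ (b : List Int), b.Pairwise (· ≤ ·) →
    ∀ (i j : Nat) (w : Int), (∀ z ∈ b, i ≤ a.countP (fun t => t < z)) →
    (b.foldl (altStep a) (i, j, w)).2.2 = W a j w b := by
  intro b
  induction b with
  | nil => intro _ i j w _; simp [W]
  | cons y b' ih =>
    intro hb i j w hinv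
    have hadv : altAdvance a y i = a.countP (fun z => z < y) :=
      altAdvance_eq_countP a ha y i (hinv y (by simp))
    have hstep : altStep a (i, j, w) y =
        (a.countP (fun z => z < y), j + 1, max w (((j + 1 : Nat) : Int) - (a.countP (fun z => z < y) : Int))) := by
      simp [altStep, hadv]
    rw [List.foldl_cons, hstep, W]
    apply ih (List.pairwise_cons.mp hb).2
    intro z hz
    apply List.countP_mono_left
    intro t _ ht
    simp only [decide_eq_true_eq] at ht ⊢
    exact lt_of_lt_of_le ht ((List.pairwise_cons.mp hb).1 z hz)

-- getD through reverse
theorem getD_reverse (l : List Int) (i : Nat) (hi : i < l.length) :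
    l.reverse.getD i 0 = l.getD (l.length - 1 - i) 0 := by
  have h1 : i < l.reverse.length := by simpa using hi
  have h2 : l.length - 1 - i < l.length := by omega
  rw [List.getD_eq_getElem _ _ h1, List.getD_eq_getElem _ _ h2, List.getElem_reverse]

-- counting characterisation of order statistics: on a sorted list, at least k+1 elements
-- satisfy a downward-closed predicate iff the (k+1)-st smallest element does
theorem sorted_countP_ge_iff (a : List Int) (ha : a.Pairwise (· ≤ ·)) (p : Int → Bool)
    (hmono : ∀ u v : Int, u ≤ v → p v = true → p u = true) (k : Nat) (hk : k < a.length) :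
    k + 1 ≤ a.countP p ↔ p (a.getD k 0) = true := by
  constructor
  · intro hcnt
    by_contra hnp
    have hnp' : p (a.getD k 0) = false := by
      cases h : p (a.getD k 0)
      · rfl
      · exact absurd h hnp
    have hdrop : (a.drop k).countP p = 0 := by
      rw [List.countP_eq_zero]
      intro z hz
      obtain ⟨j, hj, hzj⟩ := List.mem_drop_iff_getElem.mp hz
      have hak : a.getD k 0 ≤ a[k + j] := by
        rw [List.getD_eq_getElem a 0 hk]
        rcases Nat.eq_zero_or_pos j with rfl | hjpos
        · simp
        · exact List.pairwise_iff_getElem.mp ha k (k + j) hk (by omega) (by omega)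
      intro hpz
      have := hmono (a.getD k 0) a[k + j] hak (hzj ▸ hpz)
      rw [this] at hnp'
      exact Bool.true_eq_false.mp hnp'
    have hsplit : a.countP p = (a.take k).countP p + (a.drop k).countP p := by
      conv_lhs => rw [← List.take_append_drop k a]
      rw [List.countP_append]
    have htlen : (a.take k).length = k := List.length_take_of_le (by omega)
    have := List.countP_le_length (l := a.take k) (p := p)
    omega
  · intro hp
    have htake : (a.take (k + 1)).countP p = k + 1 := by
      rw [List.countP_eq_length.mpr, List.length_take_of_le (by omega)]
      intro z hz
      obtain ⟨j, hj, hzj⟩ := List.mem_take_iff_getElem.mp hz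
      have hjk : j ≤ k := by omega
      have hza : a[j] ≤ a.getD k 0 := by
        rw [List.getD_eq_getElem a 0 hk]
        rcases Nat.lt_or_ge j k with h | h
        · exact List.pairwise_iff_getElem.mp ha j k (by omega) hk h
        · have : j = k := by omega
          subst this; exact le_rfl
      exact hzj ▸ hmono a[j] (a.getD k 0) hza hp
    calc k + 1 = (a.take (k + 1)).countP p := htake.symm
    _ ≤ a.countP p := by
          conv_rhs => rw [← List.take_append_drop (k + 1) a]
          rw [List.countP_append]; omega

-- the per-rank condition 'sorted(A)[j+1] < sorted(B)[j] for all j' in counting form, one y at a time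
theorem count_core (a b : List Int) (ha : a.Pairwise (· ≤ ·)) (hb : b.Pairwise (· ≤ ·))
    (hlen : b.length < a.length)
    (hidx : ∀ j : Nat, j < b.length → a.getD (j + 1) 0 < b.getD j 0)
    (y : Int) (hy : y ∈ b) :
    b.countP (fun z => z ≤ y) + 1 ≤ a.countP (fun z => z < y) := by
  have hmle : ∀ u v : Int, u ≤ v → decide (v ≤ y) = true → decide (u ≤ y) = true := by
    intro u v huv h; simp only [decide_eq_true_eq] at h ⊢; omega
  have hmlt : ∀ u v : Int, u ≤ v → decide (v < y) = true → decide (u < y) = true := by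
    intro u v huv h; simp only [decide_eq_true_eq] at h ⊢; omega
  obtain ⟨i, hi, hiy⟩ := List.getElem_of_mem hy
  set c := b.countP (fun z => z ≤ y) with hc
  have hgiy : b.getD i 0 = y := by rw [List.getD_eq_getElem b 0 hi]; exact hiy
  have hc1 : i + 1 ≤ c := by
    rw [hc, sorted_countP_ge_iff b hb _ hmle i hi, hgiy]
    simp
  have hcle : c ≤ b.length := List.countP_le_length
  have hcb : c - 1 < b.length := by omega
  have hbc_le : b.getD (c - 1) 0 ≤ y := by
    have := (sorted_countP_ge_iff b hb _ hmle (c - 1) hcb).mp (by omega)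
    simpa using this
  have hbc_ge : y ≤ b.getD (c - 1) 0 := by
    rw [List.getD_eq_getElem b 0 hcb, ← hiy]
    rcases Nat.lt_or_ge i (c - 1) with h | h
    · exact List.pairwise_iff_getElem.mp hb i (c - 1) hi hcb h
    · have : i = c - 1 := by omega
      subst this; exact le_rfl
  have hbc : b.getD (c - 1) 0 = y := le_antisymm hbc_le hbc_ge
  have hac : a.getD (c - 1 + 1) 0 < y := by
    have := hidx (c - 1) hcb
    rwa [hbc] at this
  have hceq : c - 1 + 1 = c := by omega
  rw [hceq] at hac
  rw [sorted_countP_ge_iff a ha _ hmlt c (by omega)]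
  simpa using hac

-- a none state is absorbing for A's loop
theorem foldl_solStep_none (a b : List Int) (l : List Int) :
    l.foldl (solStep a b) none = none := by
  induction l with
  | nil => rfl
  | cons x l ih => simpa [solStep] using ih

-- inside the change region every element of b wins the forward greedy
theorem fwd_all_win (b : List Int) : ∀ a : List Int, a.Pairwise (· ≤ ·) →
    b.length < a.length →
    (∀ j : Nat, j < b.length → a.getD (j + 1) 0 < b.getD j 0) →
    fwd a b = (b.length : Int) := by
  induction b with
  | nil => intro a _ _ _; simp [fwd_nil_right]
  | cons y b' ih =>
    intro a ha hlen hidx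
    match a, hlen with
    | x :: x2 :: a'', hlen =>
      have hx2y : x2 < y := by
        have := hidx 0 (by simp)
        simpa using this
      have hxy : x < y :=
        lt_of_le_of_lt ((List.pairwise_cons.mp ha).1 x2 (by simp)) hx2y
      rw [fwd, if_pos hxy]
      have hrec : fwd (x2 :: a'') b' = (b'.length : Int) := by
        apply ih (x2 :: a'') (List.pairwise_cons.mp ha).2
        · simp only [List.length_cons] at hlen ⊢; omega
        · intro j hj
          have := hidx (j + 1) (by simp only [List.length_cons]; omega)
          simpa using this
      rw [hrec]
      simp only [List.length_cons]
      push_cast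
      ring

-- inside the change region A's descending loop either raises (none) or finishes with
-- idx ≤ -2, having decremented idx once per win: ans' + idx' is invariant
theorem wrapRun (a b : List Int)
    (ha : a.Pairwise (· ≤ ·)) (hb : b.Pairwise (· ≤ ·))
    (hm : 1 ≤ b.length) (hn : b.length < a.length)
    (hidx : ∀ j : Nat, j < b.length → a.getD (j + 1) 0 < b.getD j 0) :
    ∀ k : Nat, k ≤ a.length → ∀ (ans idx : Int), idx ≤ (k : Int) - 2 →
    idx ≤ (b.length : Int) - 1 →
    (PySem.List.pyRange ((k : Int) - 1) (-1) (-1)).foldl (solStep a b) (some (ans, idx)) = none ∨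
    ∃ ans' idx' : Int,
      (PySem.List.pyRange ((k : Int) - 1) (-1) (-1)).foldl (solStep a b) (some (ans, idx)) =
        some (ans', idx') ∧ ans' + idx' = ans + idx ∧ idx' ≤ -2 := by
  intro k
  induction k with
  | zero =>
    intro _ ans idx hinv _
    rw [PySem.List.pyRange_neg_one_eq_nil (by omega)]
    exact Or.inr ⟨ans, idx, rfl, rfl, by omega⟩
  | succ k ihk =>
    intro hk ans idx hinv hmb
    have hcons : PySem.List.pyRange (((k + 1 : Nat) : Int) - 1) (-1) (-1) =
        (((k + 1 : Nat) : Int) - 1) :: PySem.List.pyRange (((k + 1 : Nat) : Int) - 1 - 1) (-1) (-1) :=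
      PySem.List.pyRange_neg_one_cons (by push_cast; omega)
    have hidx1 : ((k + 1 : Nat) : Int) - 1 = ((k : Nat) : Int) := by push_cast; ring
    have hk' : k < a.length := by omega
    have hga : PySem.List.pyGet? a ((k : Nat) : Int) = some a[k] := by
      rw [PySem.List.pyGet?_natCast]; simp [hk']
    rw [hcons, hidx1, List.foldl_cons]
    by_cases heq : idx = (k : Int) - 1
    · -- idx exactly one below the loop index: a forced win by the change region
      rcases Nat.eq_zero_or_pos k with rfl | hk1
      · -- last iteration, idx = -1: reads b[-1], the maximum of b, and a[0] beats it
        have hidxm1 : idx = -1 := by simpa using heq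
        have hlast : b.getLast? = some (b.getD (b.length - 1) 0) := by
          rw [List.getLast?_eq_getElem?, List.getElem?_eq_getElem (by omega),
            List.getD_eq_getElem b 0 (by omega)]
        have hgb : PySem.List.pyGet? b idx = some (b.getD (b.length - 1) 0) := by
          rw [hidxm1, PySem.List.pyGet?_neg_one, hlast]
        have hwin : a[(0 : Nat)] < b.getD (b.length - 1) 0 := by
          have h1 : a.getD 0 0 ≤ a.getD 1 0 := by
            rw [List.getD_eq_getElem a 0 (by omega), List.getD_eq_getElem a 0 (by omega)]
            exact List.pairwise_iff_getElem.mp ha 0 1 (by omega) (by omega) (by omega)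
          have h2 : a.getD 1 0 < b.getD 0 0 := hidx 0 (by omega)
          have h3 : b.getD 0 0 ≤ b.getD (b.length - 1) 0 := by
            rcases Nat.eq_or_lt_of_le hm with h | h
            · have : b.length - 1 = 0 := by omega
              rw [this]
            · rw [List.getD_eq_getElem b 0 (by omega), List.getD_eq_getElem b 0 (by omega)]
              exact List.pairwise_iff_getElem.mp hb 0 (b.length - 1) (by omega) (by omega) (by omega)
          have h0 : a.getD 0 0 = a[(0 : Nat)] := List.getD_eq_getElem a 0 (by omega)
          rw [← h0]; omega
        have hga0 : PySem.List.pyGet? a 0 = some a[0] := by simpa using hga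
        have hstep : solStep a b (some (ans, idx)) ((0 : Nat) : Int) = some (ans + 1, idx - 1) := by
          simp only [solStep, Nat.cast_zero, hga0, hgb]
          rw [if_pos hwin]
        rw [hstep]
        rcases ihk (by omega) (ans + 1) (idx - 1) (by omega) (by omega) with
          h | ⟨ans', idx', hfold, hsum, hle⟩
        · exact Or.inl h
        · exact Or.inr ⟨ans', idx', hfold, by omega, hle⟩
      · -- idx = k - 1 ≥ 0: reads b[k-1] and a[k] < b[k-1] by the change region
        have hkm : k - 1 < b.length := by omega
        have hidxc : idx = (((k - 1 : Nat) : Nat) : Int) := by push_cast [hk1]; omega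
        have hgb : PySem.List.pyGet? b idx = some b[k - 1] := by
          rw [hidxc, PySem.List.pyGet?_natCast]; simp [hkm]
        have hwin : a[k] < b[k - 1] := by
          have := hidx (k - 1) hkm
          have e : k - 1 + 1 = k := by omega
          rw [e, List.getD_eq_getElem a 0 hk', List.getD_eq_getElem b 0 hkm] at this
          exact this
        have hstep : solStep a b (some (ans, idx)) ((k : Nat) : Int) = some (ans + 1, idx - 1) := by
          simp [solStep, hga, hgb, hwin]
        rw [hstep]
        rcases ihk (by omega) (ans + 1) (idx - 1) (by omega) (by omega) with
          h | ⟨ans', idx', hfold, hsum, hle⟩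
        · exact Or.inl h
        · exact Or.inr ⟨ans', idx', hfold, by omega, hle⟩
    · -- idx at least two below the loop index: any step keeps the invariant
      have hlow : idx ≤ (k : Int) - 2 := by push_cast at hinv; omega
      cases hgb : PySem.List.pyGet? b idx with
      | none =>
        left
        have hstep : solStep a b (some (ans, idx)) ((k : Nat) : Int) = none := by
          simp [solStep, hga, hgb]
        rw [hstep, foldl_solStep_none]
      | some bv =>
        by_cases hcmp : a[k] < bv
        · have hstep : solStep a b (some (ans, idx)) ((k : Nat) : Int) = some (ans + 1, idx - 1) := by
            simp [solStep, hga, hgb, hcmp]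
          rw [hstep]
          rcases ihk (by omega) (ans + 1) (idx - 1) (by omega) (by omega) with
            h | ⟨ans', idx', hfold, hsum, hle⟩
          · exact Or.inl h
          · exact Or.inr ⟨ans', idx', hfold, by omega, hle⟩
        · have hstep : solStep a b (some (ans, idx)) ((k : Nat) : Int) = some (ans, idx) := by
            simp [solStep, hga, hgb, hcmp]
          rw [hstep]
          exact ihk (by omega) ans idx hlow hmb

-- the counting form of the change region, read back as per-rank inequalities on the sorted lists
theorem count_to_idx (a b : List Int) (ha : a.Pairwise (· ≤ ·)) (hb : b.Pairwise (· ≤ ·))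
    (hn : b.length < a.length)
    (hcnt : ∀ y ∈ b, b.countP (fun z => z ≤ y) + 1 ≤ a.countP (fun z => z < y)) :
    ∀ j : Nat, j < b.length → a.getD (j + 1) 0 < b.getD j 0 := by
  intro j hj
  set y := b.getD j 0 with hy
  have hmle : ∀ u v : Int, u ≤ v → decide (v ≤ y) = true → decide (u ≤ y) = true := by
    intro u v huv h; simp only [decide_eq_true_eq] at h ⊢; omega
  have hmlt : ∀ u v : Int, u ≤ v → decide (v < y) = true → decide (u < y) = true := by
    intro u v huv h; simp only [decide_eq_true_eq] at h ⊢; omega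
  have hymem : y ∈ b := by
    rw [hy, List.getD_eq_getElem b 0 hj]; exact List.getElem_mem hj
  have hb1 : j + 1 ≤ b.countP (fun z => z ≤ y) := by
    rw [sorted_countP_ge_iff b hb _ hmle j hj, ← hy]
    simp
  have ha1 : j + 1 + 1 ≤ a.countP (fun z => z < y) := by
    have := hcnt y hymem
    omega
  have := (sorted_countP_ge_iff a ha _ hmlt (j + 1) (by omega)).mp ha1
  simpa using this

-- ===== VERDICT (by name: the statement is the Claim_ definition above) =====
theorem solution_spec : Claim_unchanged_solution := by
  intro A B _ hpre hnd
  show solution A B = solution_alt A B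
  have ha : (PySem.List.sorted A (fun x => x) false).Pairwise (· ≤ ·) :=
    PySem.List.sorted_pairwise A (fun x => x)
  have hb : (PySem.List.sorted B (fun x => x) false).Pairwise (· ≤ ·) :=
    PySem.List.sorted_pairwise B (fun x => x)
  set a := PySem.List.sorted A (fun x => x) false with hadef
  set b := PySem.List.sorted B (fun x => x) false with hbdef
  have hra : a.reverse.Pairwise (· ≥ ·) := List.pairwise_reverse.mpr ha
  have hrb : b.reverse.Pairwise (· ≥ ·) := List.pairwise_reverse.mpr hb
  -- the loop never underflows
  have hok : okRun a.reverse b.reverse = true := by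
    by_contra hne
    have hfalse : okRun a.reverse b.reverse = false := by
      cases hcase : okRun a.reverse b.reverse
      · rfl
      · exact absurd hcase hne
    obtain ⟨hlen, hall⟩ := okRun_false a.reverse b.reverse hra hfalse
    simp only [List.length_reverse] at hlen hall
    have hpermA : a.Perm A := PySem.List.sorted_perm A (fun x => x) false
    have hpermB : b.Perm B := PySem.List.sorted_perm B (fun x => x) false
    rcases Nat.eq_zero_or_pos b.length with hm0 | hm1
    · -- B empty, A nonempty: A raises, excluded by Pre_
      refine hpre (Or.inl ⟨?_, ?_⟩)
      · have : 0 < A.length := by rw [← hpermA.length_eq]; omega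
        exact List.ne_nil_of_length_pos this
      · have : B.length = 0 := by rw [← hpermB.length_eq]; omega
        exact List.length_eq_zero_iff.mp this
    · -- wraparound region: D_ holds, contradiction with hnd
      have hidx : ∀ j : Nat, j < b.length → a.getD (j + 1) 0 < b.getD j 0 := by
        intro j hj
        have hj' : b.length - 1 - j < b.length := by omega
        have h := hall (b.length - 1 - j) hj'
        have hia : a.length - b.length - 1 + (b.length - 1 - j) < a.length := by omega
        have hib : b.length - 1 - j < b.length := hj'
        rw [getD_reverse a _ hia, getD_reverse b _ hib] at h
        have e1 : a.length - 1 - (a.length - b.length - 1 + (b.length - 1 - j)) = j + 1 := by omega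
        have e2 : b.length - 1 - (b.length - 1 - j) = j := by omega
        rw [e1, e2] at h
        exact h
      refine hnd ⟨?_, ?_, ?_⟩
      · rw [← hpermA.length_eq, ← hpermB.length_eq]; exact hlen
      · rw [← hpermB.length_eq]; exact hm1
      · intro y hyB
        have hyb : y ∈ b := (PySem.List.mem_sorted B (fun x => x) false y).mpr hyB
        have h := count_core a b ha hb hlen hidx y hyb
        rwa [hpermB.countP_eq, hpermA.countP_eq] at h
  -- run the bridge over the whole loop
  have hokt : okRun ((a.take a.length).reverse) ((b.take b.length).reverse) = true := by
    rw [List.take_length, List.take_length]; exact hok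
  obtain ⟨idx', hfold⟩ := bridge a b a.length b.length 0 le_rfl le_rfl hokt
  rw [List.take_length, List.take_length] at hfold
  have hA : solution A B = bwd a.reverse b.reverse := by
    show (match (PySem.List.pyRange (PySem.List.len a - 1) (-1) (-1)).foldl (solStep a b)
        (some (0, PySem.List.len b - 1)) with
      | some (ans, _) => ans
      | none => 0) = bwd a.reverse b.reverse
    rw [PySem.List.len_eq, PySem.List.len_eq, hfold]
    simp
  have hB : solution_alt A B = (b.length : Int) - dm a b := by
    show PySem.List.len b - (b.foldl (altStep a) (0, 0, 0)).2.2 = (b.length : Int) - dm a b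
    rw [PySem.List.len_eq,
      alt_fold_eq_W a ha b hb 0 0 0 (fun z _ => Nat.zero_le _),
      W_eq_dm b a ha hb]
  have hfd : fwd a b = (b.length : Int) - dm a b := by
    have := fwd_add_dm b a
    omega
  rw [hA, hB, ← hfd]
  have := fwd_eq_bwd a.reverse b.reverse hra hrb
  simpa using this.symm

theorem solution_changed : Claim_changed_solution := by
  unfold Claim_changed_solution; decide

theorem solution_tight : Claim_exact_solution := by
  intro A B _ _ hD
  obtain ⟨hlenD, hm1D, hcntD⟩ := hD
  have ha : (PySem.List.sorted A (fun x => x) false).Pairwise (· ≤ ·) :=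
    PySem.List.sorted_pairwise A (fun x => x)
  have hb : (PySem.List.sorted B (fun x => x) false).Pairwise (· ≤ ·) :=
    PySem.List.sorted_pairwise B (fun x => x)
  set a := PySem.List.sorted A (fun x => x) false with hadef
  set b := PySem.List.sorted B (fun x => x) false with hbdef
  have hpermA : a.Perm A := PySem.List.sorted_perm A (fun x => x) false
  have hpermB : b.Perm B := PySem.List.sorted_perm B (fun x => x) false
  have hn : b.length < a.length := by rw [hpermA.length_eq, hpermB.length_eq]; exact hlenD
  have hm : 1 ≤ b.length := by rw [hpermB.length_eq]; exact hm1D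
  have hcnt : ∀ y ∈ b, b.countP (fun z => z ≤ y) + 1 ≤ a.countP (fun z => z < y) := by
    intro y hy
    rw [hpermA.countP_eq, hpermB.countP_eq]
    exact hcntD y ((PySem.List.mem_sorted B (fun x => x) false y).mp hy)
  have hidx : ∀ j : Nat, j < b.length → a.getD (j + 1) 0 < b.getD j 0 :=
    count_to_idx a b ha hb hn hcnt
  -- B's side: every element of b wins, so solution_alt = len b
  have hB : solution_alt A B = (b.length : Int) := by
    have h1 : solution_alt A B = (b.length : Int) - dm a b := by
      show PySem.List.len b - (b.foldl (altStep a) (0, 0, 0)).2.2 = (b.length : Int) - dm a b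
      rw [PySem.List.len_eq,
        alt_fold_eq_W a ha b hb 0 0 0 (fun z _ => Nat.zero_le _),
        W_eq_dm b a ha hb]
    have h2 : fwd a b + dm a b = (b.length : Int) := fwd_add_dm b a
    have h3 : fwd a b = (b.length : Int) := fwd_all_win b a ha hn hidx
    omega
  -- A's side: the wrapped run either raises (0) or overshoots (≥ len b + 1)
  have hA := wrapRun a b ha hb hm hn hidx a.length le_rfl 0 ((b.length : Int) - 1)
    (by omega) (by omega)
  rw [hB]
  have hshow : solution A B =
      (match (PySem.List.pyRange ((a.length : Int) - 1) (-1) (-1)).foldl (solStep a b)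
          (some (0, (b.length : Int) - 1)) with
        | some (ans, _) => ans
        | none => 0) := by
    show (match (PySem.List.pyRange (PySem.List.len a - 1) (-1) (-1)).foldl (solStep a b)
        (some (0, PySem.List.len b - 1)) with
      | some (ans, _) => ans
      | none => 0) = _
    rw [PySem.List.len_eq, PySem.List.len_eq]
  rcases hA with hnone | ⟨ans', idx', hfold, hsum, hle⟩
  · rw [hshow, hnone]
    simp only []
    omega
  · rw [hshow, hfold]
    simp only []
    omega
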